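-- pv_equiv track=rewrite | github.com/phrynevych/egoi-2025 | day2/laserstrike/data/gen.py | line_alt
-- ===== SOURCE A (Python) =====
-- def line_alt(n):
--     assert n%2==0
--     eds = []
--     eds.append((n//2,n//2-1))
--     u = n//2
--     v = n//2-1
--     for i in range(n//2-1):
--         eds.append((u,n//2-2-i))
--         eds.append((v,n//2+1+i))
--         u = n//2+1+i
--         v = n//2-2-i
--     assert len(eds) == n-1
--     return eds
-- ===== SOURCE B (Python) =====
-- def line_alt(n):
--     assert n % 2 == 0 and n >= 2
--     # phase 1: the two new local edges contributed by each even-size subpath t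
--     raw = [((1, 0), 2)]
--     for t in range(4, n + 1, 2):
--         raw.append(((t - 2, 0), t))
--         raw.append(((1, t - 1), t))
--     # phase 2: relabel: the size-t subpath sits shifted by (n - t) // 2 in the final tree
--     return [(a + (n - t) // 2, b + (n - t) // 2) for ((a, b), t) in raw]
-- ===== Notes on version B (the rewrite author's own statement) =====
-- stated objective: alternative
-- what changed: B replaces A's single loop threading the running endpoints u,v through iterations by a two-phase construction: phase 1 collects the two local edges each even-size subpath of the tree contributes (in local coordinates, tagged with the subpath size t), phase 2 relabels every edge by its subpath's final offset (n - t) // 2.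
import Mathlib
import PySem

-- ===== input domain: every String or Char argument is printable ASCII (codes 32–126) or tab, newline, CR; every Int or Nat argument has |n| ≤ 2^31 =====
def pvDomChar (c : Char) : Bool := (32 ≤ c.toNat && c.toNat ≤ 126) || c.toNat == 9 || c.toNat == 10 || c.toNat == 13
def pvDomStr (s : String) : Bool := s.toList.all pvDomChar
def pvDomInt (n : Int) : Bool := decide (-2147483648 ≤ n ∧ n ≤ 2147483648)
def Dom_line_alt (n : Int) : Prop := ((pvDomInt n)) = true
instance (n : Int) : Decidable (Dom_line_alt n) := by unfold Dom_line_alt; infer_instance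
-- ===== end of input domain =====

-- B replaces A's single loop with carried endpoints (u, v) by a two-phase construction:
-- phase 1 collects the two local edges each even-size subpath contributes, phase 2 relabels
-- every edge by its subpath's final offset (n - t) // 2 (alternative decomposition).

-- ===== PORT A =====
def line_alt (n : Int) : List (Int × Int) :=
  if PySem.Int.mod n 2 ≠ 0 then []   -- assert n%2==0: raises AssertionError, excluded by Pre_
  else
    let m := PySem.Int.floordiv n 2
    let s := (PySem.List.pyRange 0 (m - 1) 1).foldl
      (fun (st : List (Int × Int) × Int × Int) i =>
        (st.1 ++ [(st.2.1, m - 2 - i), (st.2.2, m + 1 + i)], m + 1 + i, m - 2 - i))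
      ([(m, m - 1)], m, m - 1)
    if (s.1.length : Int) ≠ n - 1 then []   -- assert len(eds)==n-1: raises AssertionError, excluded by Pre_
    else s.1

-- ===== PORT B =====
def line_alt_alt (n : Int) : List (Int × Int) :=
  if ¬ (PySem.Int.mod n 2 = 0 ∧ 2 ≤ n) then []   -- assert: raises AssertionError, excluded by Pre_
  else
    ((PySem.List.pyRange 4 (n + 1) 2).foldl
      (fun (acc : List ((Int × Int) × Int)) t => acc ++ [((t - 2, 0), t), ((1, t - 1), t)])
      [((1, 0), 2)]).map (fun e =>
      (e.1.1 + PySem.Int.floordiv (n - e.2) 2, e.1.2 + PySem.Int.floordiv (n - e.2) 2))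

-- ===== PRECONDITION & SPEC =====
-- Pre_ excludes exactly the inputs where A raises AssertionError: odd n (first assert)
-- and even n ≤ 0 (where the final length assert fails). A returns on every n satisfying Pre_.
def Pre_line_alt (n : Int) : Prop := PySem.Int.mod n 2 = 0 ∧ 2 ≤ n
instance (n : Int) : Decidable (Pre_line_alt n) := by unfold Pre_line_alt; infer_instance
def pvWitness_line_alt : Int := (2)

def Spec_line_alt (n : Int) (out : List (Int × Int)) : Prop := out = line_alt_alt n
instance (n : Int) (out : List (Int × Int)) : Decidable (Spec_line_alt n out) := by unfold Spec_line_alt; infer_instance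

-- ===== CLAIM (what is proved, stated in full; the proofs are below) =====
def Claim_equal_line_alt : Prop := ∀ (n : Int), Dom_line_alt n → Pre_line_alt n → Spec_line_alt n (line_alt n)

-- ===== LEMMAS AND PROOFS =====

-- common closed form: head edge followed by the interleaved blocks for indices < k
def pvF (m : Int) (k : Nat) : List (Int × Int) :=
  (m, m - 1) ::
    (List.range k).flatMap
      (fun (j : Nat) => [((m + (j : Int), m - 2 - (j : Int)) : Int × Int),
                         (m - 1 - (j : Int), m + 1 + (j : Int))])

-- loop invariant for A: after k iterations the endpoints are m+k, m-1-k and the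
-- accumulated list is pvF m k
lemma loopA_eq (m : Int) (k : Nat) :
    (List.range k).foldl
      (fun (st : List (Int × Int) × Int × Int) (j : Nat) =>
        (st.1 ++ [(st.2.1, m - 2 - (j : Int)), (st.2.2, m + 1 + (j : Int))],
          m + 1 + (j : Int), m - 2 - (j : Int)))
      ([(m, m - 1)], m, m - 1)
    = (pvF m k, m + (k : Int), m - 1 - (k : Int)) := by
  induction k with
  | zero => simp [pvF]
  | succ k ih =>
      rw [List.range_succ, List.foldl_append, ih]
      simp only [List.foldl_cons, List.foldl_nil]
      refine Prod.ext ?_ (Prod.ext (by simp; try ring) (by simp; try ring))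
      simp [pvF, List.range_succ]

-- B's two phases also produce the closed form
lemma altB_eq (k : Nat) : line_alt_alt (2 * ((k : Int) + 1)) = pvF ((k : Int) + 1) k := by
  have hcond : PySem.Int.mod (2 * ((k : Int) + 1)) 2 = 0 ∧ 2 ≤ 2 * ((k : Int) + 1) := by
    refine ⟨?_, by omega⟩
    rw [PySem.Int.mod_eq_zero_iff_dvd]; exact ⟨_, rfl⟩
  unfold line_alt_alt
  rw [if_neg (not_not_intro hcond)]
  rw [PySem.List.pyRange_of_pos 4 (2 * ((k : Int) + 1) + 1) (by norm_num)]
  have hcnt : (if (4 : Int) < 2 * ((k : Int) + 1) + 1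
      then (((2 * ((k : Int) + 1) + 1 - 4 + 2 - 1) / 2).toNat) else 0) = k := by
    split_ifs <;> omega
  rw [hcnt, List.foldl_map, PySem.List.foldl_append_eq_flatMap]
  simp only [pvF, List.map_append, List.map_cons, List.map_nil, List.map_flatMap]
  refine List.cons_eq_cons.mpr ⟨?_, ?_⟩
  · simp only [Prod.mk.injEq, PySem.Int.floordiv_eq_ediv_of_pos (by norm_num : (0:Int) < 2)]
    omega
  · apply List.flatMap_congr
    intro j _
    simp only [Prod.mk.injEq, List.cons.injEq, and_true,
      PySem.Int.floordiv_eq_ediv_of_pos (by norm_num : (0:Int) < 2)]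
    omega

-- ===== VERDICT (by name: the statement is the Claim_ definition above) =====
theorem line_alt_spec : Claim_equal_line_alt := by
  intro n _ hpre
  obtain ⟨hmod, hn⟩ := hpre
  unfold Spec_line_alt line_alt
  rw [if_neg (not_not_intro hmod)]
  set m := PySem.Int.floordiv n 2 with hm
  have hn2 : n = 2 * m := by
    have := PySem.Int.floordiv_mul_add_mod n 2
    omega
  have hm1 : 1 ≤ m := by omega
  simp only [PySem.List.pyRange_one, List.foldl_map, zero_add, sub_zero]
  rw [loopA_eq m ((m - 1).toNat)]
  have hlen : (((pvF m ((m - 1).toNat)).length : Int)) = n - 1 := by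
    have hlf : ∀ l : List ℕ,
        (l.flatMap (fun (j : Nat) => [((m + (j : Int), m - 2 - (j : Int)) : Int × Int),
                           (m - 1 - (j : Int), m + 1 + (j : Int))])).length = 2 * l.length := by
      intro l; induction l with
      | nil => simp
      | cons a t ih => simp [ih]; ring
    simp [pvF, hlf, List.length_range]
    omega
  rw [if_neg (by rw [hlen]; simp)]
  have hk : n = 2 * (((m - 1).toNat : Int) + 1) := by omega
  have hmm : ((m - 1).toNat : Int) + 1 = m := by omega
  rw [hk, altB_eq ((m - 1).toNat), hmm]
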